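-- pv_equiv track=rewrite | github.com/hosle/EaglePy2025 | src/array/warehouse_process.py | find_last_warehouse_id
-- ===== SOURCE A (Python) =====
-- def find_last_warehouse_id(amount, wh, start_id) -> int:
--     accumulated = wh[start_id]
--     warehouse_size = len(wh)
--     i = start_id
--
--     while accumulated < amount:
--         i = (i + 1) % warehouse_size
--         accumulated += wh[i]
--
--     return i
-- ===== SOURCE B (Python) =====
-- def find_last_warehouse_id(amount, wh, start_id) -> int:
--     n = len(wh)
--     s = start_id % n
--     if wh[s] >= amount:
--         return start_id
--     rot = wh[s:] + wh[:s]
--     pref = []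
--     acc = 0
--     for x in rot:
--         acc += x
--         pref.append(acc)
--     total = pref[-1]
--     best = max(pref)
--     k = 0
--     if best < amount:
--         # A only terminates here when the cycle sum is positive
--         k = -((best - amount) // total)  # ceil((amount - best) / total)
--     target = amount - k * total
--     t = next(idx for idx, p in enumerate(pref) if p >= target)
--     return (s + t) % n
-- ===== Notes on version B (the rewrite author's own statement) =====
-- stated objective: alternative
-- what changed: A walks the circle one warehouse at a time until the accumulated amount reaches the threshold; B instead computes the prefix sums of the rotated list once, derives the number of full wrap laps by one ceiling division by the cycle sum, and finds the remaining step with a single scan of the prefix list.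
import Mathlib
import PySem

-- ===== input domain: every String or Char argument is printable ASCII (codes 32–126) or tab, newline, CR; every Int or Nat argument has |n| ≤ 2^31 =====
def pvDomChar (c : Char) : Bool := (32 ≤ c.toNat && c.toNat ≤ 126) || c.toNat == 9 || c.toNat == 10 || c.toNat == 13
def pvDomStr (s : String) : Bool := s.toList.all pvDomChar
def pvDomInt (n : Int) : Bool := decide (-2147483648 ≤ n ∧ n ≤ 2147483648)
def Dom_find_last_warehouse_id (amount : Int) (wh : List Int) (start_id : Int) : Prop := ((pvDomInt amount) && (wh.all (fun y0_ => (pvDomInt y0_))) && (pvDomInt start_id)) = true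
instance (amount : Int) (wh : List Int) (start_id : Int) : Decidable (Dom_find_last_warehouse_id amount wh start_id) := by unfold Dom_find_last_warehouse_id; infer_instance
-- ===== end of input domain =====

-- B replaces A's step-by-step circular walk by one prefix-sum pass plus a ceiling division for the wrap count (objective: alternative).

-- ===== PORT A =====
-- A's while loop; the fuel argument only makes it total: it is a provable upper bound on the
-- number of iterations on every input admitted by Pre_, so it is never exhausted there.
def pvLoopA (amount : Int) (wh : List Int) (wsize : Int) (acc : Int) (i : Int) : Nat → Int
  | 0 => i
  | fuel+1 =>
    if acc < amount then
      let i' := PySem.Int.mod (i + 1) wsize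
      pvLoopA amount wh wsize (acc + PySem.List.pyGetD wh i' 0) i' fuel
    else i

def find_last_warehouse_id (amount : Int) (wh : List Int) (start_id : Int) : Int :=
  let accumulated := PySem.List.pyGetD wh start_id 0
  let warehouse_size := (wh.length : Int)
  pvLoopA amount wh warehouse_size accumulated start_id
    (wh.length * (amount.natAbs + (wh.map Int.natAbs).sum + 2))

-- ===== PORT B =====
-- running prefix sums of a list (the python `for x in rot: acc += x; pref.append(acc)` loop)
def pvPref (acc : Int) : List Int → List Int
  | [] => []
  | x :: xs => (acc + x) :: pvPref (acc + x) xs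

def find_last_warehouse_id_alt (amount : Int) (wh : List Int) (start_id : Int) : Int :=
  let n := (wh.length : Int)
  let s := PySem.Int.mod start_id n
  if amount ≤ PySem.List.pyGetD wh s 0 then start_id
  else
    let rot := PySem.List.slice wh (some s) none ++ PySem.List.slice wh none (some s)
    let pref := pvPref 0 rot
    let total := PySem.List.pyGetD pref (-1) 0
    let best := (PySem.List.max? pref (fun y => y)).getD 0
    let k := if best < amount then -(PySem.Int.floordiv (best - amount) total) else 0
    let target := amount - k * total
    let t := (pref.findIdx (fun p => decide (target ≤ p)) : Int)
    PySem.Int.mod (s + t) n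

-- ===== PRECONDITION & SPEC =====
-- Pre_ excludes exactly the inputs on which A does not return: empty wh / start_id out of range
-- (IndexError) and the inputs on which A's while loop never terminates (no prefix of the first
-- lap of the circular walk reaches amount and the cycle sum is not positive).
def Pre_find_last_warehouse_id (amount : Int) (wh : List Int) (start_id : Int) : Prop :=
  wh ≠ [] ∧ -(wh.length : Int) ≤ start_id ∧ start_id < (wh.length : Int) ∧
  (0 < wh.sum ∨ ∃ t < wh.length, amount ≤
    ((wh.drop (PySem.Int.mod start_id (wh.length : Int)).toNat ++
      wh.take (PySem.Int.mod start_id (wh.length : Int)).toNat).take (t+1)).sum)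

instance (amount : Int) (wh : List Int) (start_id : Int) : Decidable (Pre_find_last_warehouse_id amount wh start_id) := by
  unfold Pre_find_last_warehouse_id; infer_instance

def pvWitness_find_last_warehouse_id : Int × List Int × Int := (5, [1, 2, 3], 0)

def Spec_find_last_warehouse_id (amount : Int) (wh : List Int) (start_id : Int) (out : Int) : Prop := out = find_last_warehouse_id_alt amount wh start_id
instance (amount : Int) (wh : List Int) (start_id : Int) (out : Int) : Decidable (Spec_find_last_warehouse_id amount wh start_id out) := by unfold Spec_find_last_warehouse_id; infer_instance

-- ===== CLAIM (what is proved, stated in full; the proofs are below) =====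
def Claim_equal_find_last_warehouse_id : Prop := ∀ (amount : Int) (wh : List Int) (start_id : Int), Dom_find_last_warehouse_id amount wh start_id → Pre_find_last_warehouse_id amount wh start_id → Spec_find_last_warehouse_id amount wh start_id (find_last_warehouse_id amount wh start_id)

-- ===== LEMMAS AND PROOFS =====

-- the rotated list wh[s:] + wh[:s]
def pvRot (wh : List Int) (s : Nat) : List Int := wh.drop s ++ wh.take s

-- cumulative sum of the circular walk over r after t steps (t+1 elements)
def pvCum (r : List Int) : Nat → Int
  | 0 => r.getD 0 0
  | t+1 => pvCum r t + r.getD ((t+1) % r.length) 0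

lemma pvPref_length (acc : Int) (xs : List Int) : (pvPref acc xs).length = xs.length := by
  induction xs generalizing acc with
  | nil => rfl
  | cons x xs ih => simp [pvPref, ih]

lemma pvPref_getD (acc : Int) (xs : List Int) (t : Nat) (ht : t < xs.length) :
    (pvPref acc xs).getD t 0 = acc + (xs.take (t+1)).sum := by
  induction xs generalizing acc t with
  | nil => simp at ht
  | cons x xs ih =>
    cases t with
    | zero => simp [pvPref]
    | succ t =>
      simp only [pvPref, List.getD_cons_succ, List.take_succ_cons, List.sum_cons]
      rw [ih (acc + x) t (by simpa using ht)]
      ring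

lemma pvRot_length (wh : List Int) (s : Nat) (hs : s ≤ wh.length) :
    (pvRot wh s).length = wh.length := by
  simp [pvRot]; omega

lemma pvRot_sum (wh : List Int) (s : Nat) : (pvRot wh s).sum = wh.sum := by
  unfold pvRot
  rw [List.sum_append, add_comm, ← List.sum_append, List.take_append_drop]

lemma pvRot_getD (wh : List Int) (s j : Nat) (hs : s < wh.length) (hj : j < wh.length) :
    (pvRot wh s).getD j 0 = wh.getD ((s + j) % wh.length) 0 := by
  unfold pvRot
  have hmod : (s + j) % wh.length = if s + j < wh.length then s + j else s + j - wh.length := by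
    split
    · exact Nat.mod_eq_of_lt (by omega)
    · rw [Nat.mod_eq_sub_mod (by omega), Nat.mod_eq_of_lt (by omega)]
  rw [hmod]
  by_cases h : j < wh.length - s
  · rw [if_pos (by omega)]
    rw [List.getD_eq_getElem _ 0
          (by simp only [List.length_append, List.length_drop, List.length_take]; omega),
        List.getD_eq_getElem _ 0 (by omega : s + j < wh.length)]
    rw [List.getElem_append_left (by simp only [List.length_drop]; omega)]
    rw [List.getElem_drop]
  · rw [if_neg (by omega)]
    rw [List.getD_eq_getElem _ 0
          (by simp only [List.length_append, List.length_drop, List.length_take]; omega),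
        List.getD_eq_getElem _ 0 (by omega : s + j - wh.length < wh.length)]
    rw [List.getElem_append_right (by simp only [List.length_drop]; omega)]
    rw [List.getElem_take]
    congr 1
    simp only [List.length_drop]
    omega

lemma pvCum_lt (r : List Int) (t : Nat) (ht : t < r.length) :
    pvCum r t = (r.take (t+1)).sum := by
  induction t with
  | zero =>
    cases r with
    | nil => simp at ht
    | cons x xs => simp [pvCum]
  | succ t ih =>
    rw [pvCum, ih (by omega), Nat.mod_eq_of_lt ht,
      List.sum_take_succ r (t+1) ht, List.getD_eq_getElem r 0 ht]

lemma pvCum_cycle (r : List Int) (hr : r ≠ []) (t : Nat) :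
    pvCum r (t + r.length) = pvCum r t + r.sum := by
  have hlen : 0 < r.length := List.length_pos_iff.mpr hr
  induction t with
  | zero =>
    obtain ⟨n, hn⟩ : ∃ n, r.length = n + 1 := ⟨r.length - 1, by omega⟩
    have h1 : (0:Nat) + r.length = n + 1 := by omega
    rw [h1, show pvCum r (n+1) = pvCum r n + r.getD ((n+1) % r.length) 0 from rfl]
    have h2 : (n + 1) % r.length = 0 := by rw [← hn]; exact Nat.mod_self _
    rw [h2]
    have h3 : pvCum r n = r.sum := by
      rw [pvCum_lt r n (by omega)]
      rw [← hn, List.take_of_length_le (le_refl _)]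
    rw [h3, show pvCum r 0 = r.getD 0 0 from rfl]
    ring
  | succ t ih =>
    have h2 : t + 1 + r.length = (t + r.length) + 1 := by omega
    rw [h2, show pvCum r (t + r.length + 1) = pvCum r (t + r.length) + r.getD ((t + r.length + 1) % r.length) 0 from rfl, ih,
       show pvCum r (t + 1) = pvCum r t + r.getD ((t+1) % r.length) 0 from rfl]
    have h3 : (t + r.length + 1) % r.length = (t + 1) % r.length := by
      have := Nat.add_mod_right (t + 1) r.length
      rw [← this]; ring_nf
    rw [h3]; ring

lemma pvCum_qcycle (r : List Int) (hr : r ≠ []) (q t : Nat) :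
    pvCum r (q * r.length + t) = pvCum r t + q * r.sum := by
  induction q with
  | zero => simp
  | succ q ih =>
    have : (q+1) * r.length + t = (q * r.length + t) + r.length := by ring
    rw [this, pvCum_cycle r hr, ih]; push_cast; ring

lemma pvStepMod (n a : Nat) (i : Int) (_hn : 0 < n) (hi : i % (n:Int) = ((a % n : Nat) : Int)) :
    (i + 1) % (n:Int) = (((a + 1) % n : Nat) : Int) := by
  rw [Int.add_emod, hi]
  push_cast
  rw [← Int.add_emod]

lemma pvModShift (s t n : Nat) : (s + (t+1) % n) % n = (s + (t+1)) % n := by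
  conv_lhs => rw [Nat.add_mod]
  conv_rhs => rw [Nat.add_mod]
  simp

-- the main characterisation of A's loop: starting at abstract time t with the matching
-- accumulator and index, it returns the index at the least hitting time M
lemma pvLoopA_eq (amount : Int) (wh : List Int) (s M : Nat) (hs : s < wh.length)
    (hM1 : amount ≤ pvCum (pvRot wh s) M)
    (hM2 : ∀ j, j < M → pvCum (pvRot wh s) j < amount) :
    ∀ (fuel t : Nat) (i : Int), t ≤ M → M - t ≤ fuel →
    PySem.Int.mod i (wh.length : Int) = (((s + t) % wh.length : Nat) : Int) →
    pvLoopA amount wh (wh.length : Int) (pvCum (pvRot wh s) t) i fuel =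
      (if t = M then i else (((s + M) % wh.length : Nat) : Int)) := by
  have hn : 0 < wh.length := by omega
  have hnI : (0:Int) < (wh.length : Int) := by exact_mod_cast hn
  have hrlen : (pvRot wh s).length = wh.length := pvRot_length wh s (by omega)
  intro fuel
  induction fuel with
  | zero =>
    intro t i ht hf hi
    have : t = M := by omega
    rw [pvLoopA, if_pos this]
  | succ fuel ih =>
    intro t i ht hf hi
    rw [show pvLoopA amount wh (wh.length : Int) (pvCum (pvRot wh s) t) i (fuel+1) =
        (if pvCum (pvRot wh s) t < amount then
          pvLoopA amount wh (wh.length : Int)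
            (pvCum (pvRot wh s) t + PySem.List.pyGetD wh (PySem.Int.mod (i + 1) (wh.length : Int)) 0)
            (PySem.Int.mod (i + 1) (wh.length : Int)) fuel
        else i) from rfl]
    by_cases hc : pvCum (pvRot wh s) t < amount
    · rw [if_pos hc]
      have htM : t ≠ M := by intro h; rw [h] at hc; omega
      have htM' : t < M := by omega
      have hiE : i % (wh.length : Int) = (((s + t) % wh.length : Nat) : Int) := by
        rw [← PySem.Int.mod_eq_emod_of_pos hnI]; exact hi
      have hi' : PySem.Int.mod (i + 1) (wh.length : Int) = (((s + t + 1) % wh.length : Nat) : Int) := by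
        rw [PySem.Int.mod_eq_emod_of_pos hnI]
        exact pvStepMod wh.length (s+t) i hn hiE
      rw [hi']
      have hacc : pvCum (pvRot wh s) t + PySem.List.pyGetD wh (((s + t + 1) % wh.length : Nat) : Int) 0
          = pvCum (pvRot wh s) (t+1) := by
        rw [PySem.List.pyGetD_natCast]
        rw [show pvCum (pvRot wh s) (t+1) = pvCum (pvRot wh s) t + (pvRot wh s).getD ((t+1) % (pvRot wh s).length) 0 from rfl]
        rw [hrlen, pvRot_getD wh s ((t+1) % wh.length) hs (Nat.mod_lt _ hn), pvModShift]
        rfl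
      rw [hacc]
      have := ih (t+1) (((s + t + 1) % wh.length : Nat) : Int) (by omega) (by omega) (by
        have : PySem.Int.mod (((s + t + 1) % wh.length : Nat) : Int) ((wh.length : Nat) : Int)
            = ((((s + t + 1) % wh.length) % wh.length : Nat) : Int) := PySem.Int.mod_natCast _ _
        rw [this, Nat.mod_mod]
        congr 1)
      rw [this]
      by_cases hM : t + 1 = M
      · rw [if_pos hM, if_neg htM, ← hM]
        rfl
      · rw [if_neg hM, if_neg htM]
    · rw [if_neg hc]
      have : t = M := by
        by_contra h
        exact hc (hM2 t (by omega))
      rw [if_pos this]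

-- value of python's wh[start_id] for an in-range (possibly negative) index,
-- expressed through the normalised start position
lemma pvModVal (a n : Int) (hn : 0 < n) (h1 : -n ≤ a) (h2 : a < n) :
    PySem.Int.mod a n = if 0 ≤ a then a else a + n := by
  rw [PySem.Int.mod_eq_emod_of_pos hn]
  split
  · exact Int.emod_eq_of_lt ‹_› h2
  · rw [Int.emod_eq_add_self_emod]
    exact Int.emod_eq_of_lt (by omega) (by omega)

lemma pvStart (wh : List Int) (start_id : Int)
    (h1 : -(wh.length : Int) ≤ start_id) (h2 : start_id < (wh.length : Int)) (hne : wh ≠ []) :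
    PySem.List.pyGetD wh start_id 0 =
      wh.getD (PySem.Int.mod start_id (wh.length : Int)).toNat 0 := by
  have hn : 0 < wh.length := List.length_pos_iff.mpr hne
  have hnI : (0:Int) < (wh.length : Int) := by exact_mod_cast hn
  rw [pvModVal start_id _ hnI h1 h2]
  by_cases h : 0 ≤ start_id
  · rw [if_pos h, PySem.List.pyGetD_eq_getElem wh 0 h h2,
      List.getD_eq_getElem _ 0 (by omega : start_id.toNat < wh.length)]
  · rw [if_neg h]
    have hk : start_id = -(((-start_id).toNat : Nat) : Int) := by omega
    rw [List.getD_eq_getElem _ 0 (by omega : (start_id + (wh.length:Int)).toNat < wh.length)]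
    conv_lhs => rw [hk]
    rw [PySem.List.pyGetD_neg_natCast wh (-start_id).toNat 0 (by omega) (by omega)]
    congr 1
    omega

lemma pvAbsSumLe (l : List Int) : |l.sum| ≤ (l.map (fun x => |x|)).sum := by
  induction l with
  | nil => simp
  | cons x xs ih =>
    simp only [List.sum_cons, List.map_cons]
    calc |x + xs.sum| ≤ |x| + |xs.sum| := abs_add_le _ _
    _ ≤ |x| + (xs.map (fun x => |x|)).sum := by linarith

lemma pvCastAbsSum (wh : List Int) :
    (((wh.map Int.natAbs).sum : Nat) : Int) = (wh.map (fun x => |x|)).sum := by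
  induction wh with
  | nil => simp
  | cons x xs ih =>
    simp only [List.map_cons, List.sum_cons, Nat.cast_add]
    rw [ih, Int.abs_eq_natAbs]

lemma pvRotMapAbsSum (wh : List Int) (s : Nat) :
    ((pvRot wh s).map (fun x => |x|)).sum = (wh.map (fun x => |x|)).sum := by
  have : (pvRot wh s).map (fun x => |x|) = pvRot (wh.map (fun x => |x|)) s := by
    simp only [pvRot, List.map_append, List.map_drop, List.map_take]
  rw [this, pvRot_sum]

lemma pvTakeAbsLe (r : List Int) (m : Nat) :
    |(r.take m).sum| ≤ (r.map (fun x => |x|)).sum := by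
  calc |(r.take m).sum| ≤ ((r.take m).map (fun x => |x|)).sum := pvAbsSumLe _
  _ ≤ (r.map (fun x => |x|)).sum := by
      conv_rhs => rw [← List.take_append_drop m r]
      rw [List.map_append, List.sum_append]
      have : 0 ≤ ((r.drop m).map (fun x => |x|)).sum :=
        List.sum_nonneg (by
          intro x hx
          obtain ⟨y, _, rfl⟩ := List.mem_map.mp hx
          exact abs_nonneg y)
      linarith

-- A's result, characterised by any least hitting time M that fits in the fuel bound
lemma pvA_eq (amount : Int) (wh : List Int) (start_id : Int) (M : Nat)
    (h1 : -(wh.length : Int) ≤ start_id) (h2 : start_id < (wh.length : Int)) (hne : wh ≠ [])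
    (hM1 : amount ≤ pvCum (pvRot wh (PySem.Int.mod start_id (wh.length : Int)).toNat) M)
    (hM2 : ∀ j, j < M → pvCum (pvRot wh (PySem.Int.mod start_id (wh.length : Int)).toNat) j < amount)
    (hfuel : M ≤ wh.length * (amount.natAbs + (wh.map Int.natAbs).sum + 2)) :
    find_last_warehouse_id amount wh start_id =
      if M = 0 then start_id
      else ((((PySem.Int.mod start_id (wh.length : Int)).toNat + M) % wh.length : Nat) : Int) := by
  have hn : 0 < wh.length := List.length_pos_iff.mpr hne
  have hnI : (0:Int) < (wh.length : Int) := by exact_mod_cast hn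
  have hs0 : 0 ≤ PySem.Int.mod start_id (wh.length : Int) := PySem.Int.mod_nonneg _ hnI
  have hslt : PySem.Int.mod start_id (wh.length : Int) < (wh.length : Int) := PySem.Int.mod_lt _ hnI
  set s : Nat := (PySem.Int.mod start_id (wh.length : Int)).toNat with hs_def
  have hs : s < wh.length := by omega
  have hcast : ((s : Nat) : Int) = PySem.Int.mod start_id (wh.length : Int) := Int.toNat_of_nonneg hs0
  have hcum0 : pvCum (pvRot wh s) 0 = wh.getD s 0 := by
    rw [show pvCum (pvRot wh s) 0 = (pvRot wh s).getD 0 0 from rfl,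
      pvRot_getD wh s 0 hs hn]
    congr 1
    rw [Nat.add_zero, Nat.mod_eq_of_lt hs]
  have hstart : PySem.List.pyGetD wh start_id 0 = pvCum (pvRot wh s) 0 := by
    rw [hcum0, pvStart wh start_id h1 h2 hne]
  have hmod0 : PySem.Int.mod start_id (wh.length : Int) = (((s + 0) % wh.length : Nat) : Int) := by
    rw [← hcast]
    congr 1
    rw [Nat.add_zero, Nat.mod_eq_of_lt hs]
  unfold find_last_warehouse_id
  simp only []
  rw [hstart]
  rw [pvLoopA_eq amount wh s M hs hM1 hM2 _ 0 start_id (by omega) (by omega) hmod0]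
  by_cases hM : (0:Nat) = M
  · rw [if_pos hM, if_pos hM.symm]
  · rw [if_neg hM, if_neg (by omega : ¬ M = 0)]

lemma pvFuelBase (wh : List Int) (X : Nat) (_hn : 0 < wh.length) :
    wh.length ≤ wh.length * (X + 2) := Nat.le_mul_of_pos_right _ (by omega)

theorem find_last_warehouse_id_spec : Claim_equal_find_last_warehouse_id := by
  intro amount wh start_id hdom hpre
  obtain ⟨hne, hlo, hhi, hdisj⟩ := hpre
  unfold Spec_find_last_warehouse_id
  have hn : 0 < wh.length := List.length_pos_iff.mpr hne
  have hnI : (0:Int) < (wh.length : Int) := by exact_mod_cast hn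
  have hs0 : 0 ≤ PySem.Int.mod start_id (wh.length : Int) := PySem.Int.mod_nonneg _ hnI
  have hslt' : PySem.Int.mod start_id (wh.length : Int) < (wh.length : Int) := PySem.Int.mod_lt _ hnI
  set s : Nat := (PySem.Int.mod start_id (wh.length : Int)).toNat with hs_def
  have hs : s < wh.length := by omega
  have hcast : ((s : Nat) : Int) = PySem.Int.mod start_id (wh.length : Int) := Int.toNat_of_nonneg hs0
  set r : List Int := pvRot wh s with hr_def
  have hrot_eq : wh.drop s ++ wh.take s = r := by rw [hr_def, pvRot]
  have hrlen : r.length = wh.length := by rw [hr_def]; exact pvRot_length wh s (by omega)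
  have hrne : r ≠ [] := by
    intro h; rw [h] at hrlen; simp at hrlen; omega
  set pref : List Int := pvPref 0 r with hpref_def
  have hplen : pref.length = wh.length := by rw [hpref_def, pvPref_length, hrlen]
  have hprefne : pref ≠ [] := by
    intro h; rw [h] at hplen; simp at hplen; omega
  have hprefcum : ∀ t, t < wh.length → pref.getD t 0 = pvCum r t := by
    intro t ht
    rw [hpref_def, pvPref_getD 0 r t (by omega), zero_add, pvCum_lt r t (by omega)]
  have hcum0 : pvCum r 0 = wh.getD s 0 := by
    rw [hr_def, show pvCum (pvRot wh s) 0 = (pvRot wh s).getD 0 0 from rfl,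
      pvRot_getD wh s 0 hs hn]
    congr 1
    rw [Nat.add_zero, Nat.mod_eq_of_lt hs]
  -- unfold B and normalise its subexpressions
  simp only [find_last_warehouse_id_alt, ← hcast, PySem.List.pyGetD_natCast,
    PySem.List.slice_from_natCast, PySem.List.slice_to_natCast, hrot_eq, ← hpref_def]
  by_cases h0 : amount ≤ wh.getD s 0
  · -- already enough at the start: both return start_id unchanged
    rw [if_pos h0]
    rw [pvA_eq amount wh start_id 0 hlo hhi hne
      (by rw [← hs_def, ← hr_def, hcum0]; exact h0)
      (by intro j hj; omega)
      (by omega)]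
    rw [if_pos rfl]
  · rw [if_neg h0]
    -- total = r.sum
    have htot : PySem.List.pyGetD pref (-1) 0 = r.sum := by
      rw [PySem.List.pyGetD_neg_one pref 0 hprefne, List.getLast_eq_getElem,
        ← List.getD_eq_getElem pref 0 (by omega), hplen,
        hprefcum (wh.length - 1) (by omega), pvCum_lt r (wh.length - 1) (by omega)]
      rw [show wh.length - 1 + 1 = r.length by omega, List.take_length]
    -- best = some b
    obtain ⟨b, hb⟩ : ∃ b, PySem.List.max? pref (fun y => y) = some b := by
      cases hmax : PySem.List.max? pref (fun y => y) with
      | none => exact absurd ((PySem.List.max?_eq_none_iff _ _).mp hmax) hprefne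
      | some b => exact ⟨b, rfl⟩
    have hbmem : b ∈ pref := PySem.List.max?_mem hb
    have hbmax : ∀ y ∈ pref, y ≤ b := by
      have := PySem.List.max?_isMax hb; simpa using this
    obtain ⟨tb, htb, hbget⟩ := List.mem_iff_getElem.mp hbmem
    have hbcum : b = pvCum r tb := by
      rw [← hprefcum tb (by omega), List.getD_eq_getElem _ 0 (by omega), hbget]
    simp only [htot, hb, Option.getD_some]
    -- |prefix| bound used for the fuel estimate
    have habs : ∀ m : Nat, m < wh.length →
        |pvCum r m| ≤ (((wh.map Int.natAbs).sum : Nat) : Int) := by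
      intro m hm
      rw [pvCum_lt r m (by omega), pvCastAbsSum]
      calc |(r.take (m+1)).sum| ≤ (r.map (fun x => |x|)).sum := pvTakeAbsLe r (m+1)
      _ = (wh.map (fun x => |x|)).sum := by rw [hr_def]; exact pvRotMapAbsSum wh s
    by_cases hba : b < amount
    · -- wrap case: the cycle sum must be positive, k laps plus a first hit in the last lap
      simp only [if_pos hba]
      have hS : 0 < wh.sum := by
        rcases hdisj with h | ⟨t, ht, hA⟩
        · exact h
        · exfalso
          rw [hrot_eq] at hA
          have h1 : (r.take (t+1)).sum = pref.getD t 0 := by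
            rw [hprefcum t ht, pvCum_lt r t (by omega)]
          have h2 : pref.getD t 0 ≤ b := by
            rw [List.getD_eq_getElem pref 0 (by omega)]
            exact hbmax _ (List.getElem_mem _)
          linarith
      have hrS : r.sum = wh.sum := by rw [hr_def]; exact pvRot_sum wh s
      have hrSpos : 0 < r.sum := by omega
      set k : Int := -(PySem.Int.floordiv (b - amount) r.sum) with hk_def
      have hkb : (k - 1) * r.sum < amount - b ∧ amount - b ≤ k * r.sum := by
        apply (PySem.Int.neg_floordiv_neg_eq_iff_of_pos hrSpos).mp
        rw [hk_def]
        congr 2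
        ring
      obtain ⟨hklo, hkhi⟩ := hkb
      have hk1 : 1 ≤ k := by nlinarith
      have hkc : ((k.toNat : Nat) : Int) = k := Int.toNat_of_nonneg (by omega)
      set t' := pref.findIdx (fun p => decide (amount - k * r.sum ≤ p)) with ht'_def
      have ht'lt : t' < pref.length :=
        List.findIdx_lt_length_of_exists ⟨b, hbmem, by simp; linarith⟩
      have hpt' : amount - k * r.sum ≤ pref[t'] := by
        have h := List.findIdx_getElem (w := ht'lt)
        exact of_decide_eq_true h
      have hmin : ∀ j, (hj : j < pref.length) → j < t' → pref[j] < amount - k * r.sum := by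
        intro j hj hjt
        have h := List.not_of_lt_findIdx (p := fun p => decide (amount - k * r.sum ≤ p))
          (xs := pref) (by omega : j < pref.findIdx (fun p => decide (amount - k * r.sum ≤ p)))
        have h2 := of_decide_eq_false h
        omega
      set M : Nat := k.toNat * wh.length + t' with hM_def
      have hM0 : M ≠ 0 := by
        have : 1 * 1 ≤ k.toNat * wh.length := Nat.mul_le_mul (by omega) (by omega)
        omega
      have hH1 : amount ≤ pvCum r M := by
        rw [hM_def, show k.toNat * wh.length + t' = k.toNat * r.length + t' by rw [hrlen],
          pvCum_qcycle r hrne]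
        have : pvCum r t' = pref.getD t' 0 := (hprefcum t' (by omega)).symm
        rw [this, List.getD_eq_getElem pref 0 (by omega), hrS]
        have := hpt'
        nlinarith [hkc]
      have hH2 : ∀ j, j < M → pvCum r j < amount := by
        intro j hj
        have hdm := Nat.div_add_mod j wh.length
        have htj : j % wh.length < wh.length := Nat.mod_lt _ hn
        have hsplit := pvCum_qcycle r hrne (j / wh.length) (j % wh.length)
        have hjeq : (j / wh.length) * r.length + j % wh.length = j := by rw [hrlen, Nat.mul_comm]; exact hdm
        rw [hjeq] at hsplit
        rw [hsplit]
        have hcle : pvCum r (j % wh.length) ≤ b := by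
          rw [← hprefcum _ htj, List.getD_eq_getElem pref 0 (by omega)]
          exact hbmax _ (List.getElem_mem _)
        have hcomm : wh.length * (j / wh.length) = (j / wh.length) * wh.length := Nat.mul_comm _ _
        by_cases hq : j / wh.length = k.toNat
        · have htjt : j % wh.length < t' := by
            rw [hq] at hdm
            have : wh.length * k.toNat = k.toNat * wh.length := Nat.mul_comm _ _
            omega
          have hlt : pvCum r (j % wh.length) < amount - k * r.sum := by
            rw [← hprefcum _ htj, List.getD_eq_getElem pref 0 (by omega)]
            exact hmin _ (by omega) htjt
          rw [hq, hkc]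
          linarith
        · have hqlt : j / wh.length < k.toNat := by
            by_contra hcon
            have hcon' : k.toNat ≤ j / wh.length := by omega
            have h1 : (k.toNat + 1) * wh.length ≤ (j / wh.length) * wh.length :=
              Nat.mul_le_mul_right _ (by omega)
            have h2 : (j / wh.length) * wh.length ≤ j := Nat.div_mul_le_self j wh.length
            have h3 : (k.toNat + 1) * wh.length = k.toNat * wh.length + wh.length := by ring
            omega
          have hqI : ((j / wh.length : Nat) : Int) ≤ k - 1 := by omega
          have hmul : ((j / wh.length : Nat) : Int) * r.sum ≤ (k - 1) * r.sum :=
            mul_le_mul_of_nonneg_right hqI (by omega)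
          linarith
      have hfuel : M ≤ wh.length * (amount.natAbs + (wh.map Int.natAbs).sum + 2) := by
        have hkle : k ≤ amount - b := by
          have h1 : k - 1 ≤ (k - 1) * r.sum := le_mul_of_one_le_right (by omega) (by omega)
          omega
        have hbabs : |b| ≤ (((wh.map Int.natAbs).sum : Nat) : Int) := by
          rw [hbcum]; exact habs tb (by omega)
        have hamt : amount ≤ ((amount.natAbs : Nat) : Int) := by
          rw [← Int.abs_eq_natAbs]; exact le_abs_self amount
        have hX : k.toNat ≤ amount.natAbs + (wh.map Int.natAbs).sum := by
          have : k ≤ ((amount.natAbs : Nat) : Int) + (((wh.map Int.natAbs).sum : Nat) : Int) := by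
            have : -(((wh.map Int.natAbs).sum : Nat) : Int) ≤ b := by
              have := abs_le.mp hbabs; omega
            omega
          omega
        have h1 : k.toNat * wh.length ≤ (amount.natAbs + (wh.map Int.natAbs).sum) * wh.length :=
          Nat.mul_le_mul_right _ hX
        have h2 : (amount.natAbs + (wh.map Int.natAbs).sum) * wh.length + 2 * wh.length
            = wh.length * (amount.natAbs + (wh.map Int.natAbs).sum + 2) := by ring
        have h3 : t' < wh.length := by omega
        omega
      rw [pvA_eq amount wh start_id M hlo hhi hne
        (by rw [← hs_def, ← hr_def]; exact hH1)
        (by intro j hj; rw [← hs_def, ← hr_def]; exact hH2 j hj)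
        hfuel]
      rw [if_neg hM0, show ((s : Int) + (t' : Int)) = ((s + t' : Nat) : Int) by push_cast; ring,
        PySem.Int.mod_natCast]
      congr 1
      rw [hM_def, show s + (k.toNat * wh.length + t') = (s + t') + k.toNat * wh.length by ring,
        Nat.add_mul_mod_self_right]
    · -- no wrap: first prefix reaching amount inside the first lap
      simp only [if_neg hba, zero_mul, sub_zero]
      set t' := pref.findIdx (fun p => decide (amount ≤ p)) with ht'_def
      have ht'lt : t' < pref.length :=
        List.findIdx_lt_length_of_exists ⟨b, hbmem, by simp; omega⟩
      have hpt' : amount ≤ pref[t'] := by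
        have h := List.findIdx_getElem (w := ht'lt)
        exact of_decide_eq_true h
      have hmin : ∀ j, (hj : j < pref.length) → j < t' → pref[j] < amount := by
        intro j hj hjt
        have h := List.not_of_lt_findIdx (p := fun p => decide (amount ≤ p))
          (xs := pref) (by omega : j < pref.findIdx (fun p => decide (amount ≤ p)))
        have h2 := of_decide_eq_false h
        omega
      have hH1 : amount ≤ pvCum r t' := by
        rw [← hprefcum t' (by omega), List.getD_eq_getElem pref 0 (by omega)]
        exact hpt'
      have hH2 : ∀ j, j < t' → pvCum r j < amount := by
        intro j hj
        rw [← hprefcum j (by omega), List.getD_eq_getElem pref 0 (by omega)]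
        exact hmin j (by omega) hj
      have hM0 : t' ≠ 0 := by
        intro h
        have h1 := hH1
        rw [h, hcum0] at h1
        exact h0 h1
      have hfuel : t' ≤ wh.length * (amount.natAbs + (wh.map Int.natAbs).sum + 2) := by
        have := pvFuelBase wh (amount.natAbs + (wh.map Int.natAbs).sum) hn
        omega
      rw [pvA_eq amount wh start_id t' hlo hhi hne
        (by rw [← hs_def, ← hr_def]; exact hH1)
        (by intro j hj; rw [← hs_def, ← hr_def]; exact hH2 j hj)
        hfuel]
      rw [if_neg hM0, show ((s : Int) + (t' : Int)) = ((s + t' : Nat) : Int) by push_cast; ring,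
        PySem.Int.mod_natCast]
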